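-- pv_equiv track=rewrite | github.com/Cedeno2001/Proyecto-Laberinto | juego.py | encontrar_posiciones_inicio_y_fin
-- ===== SOURCE A (Python) =====
-- def encontrar_posiciones_inicio_y_fin(matriz_del_laberinto):
--     for i in range(len(matriz_del_laberinto)):
--         for u in range(len(matriz_del_laberinto[i])):
--             if matriz_del_laberinto[i][u] == "P":
--                 posicion_inicio = (i, u)
--             elif matriz_del_laberinto[i][u] == ".":
--                 posicion_final = (i, u)
--     return posicion_inicio, posicion_final
-- ===== SOURCE B (Python) =====
-- def encontrar_posiciones_inicio_y_fin(matriz_del_laberinto):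
--     inicio_encontrado = False
--     final_encontrado = False
--     for i in range(len(matriz_del_laberinto) - 1, -1, -1):
--         fila = matriz_del_laberinto[i]
--         for u in range(len(fila) - 1, -1, -1):
--             c = fila[u]
--             if c == "P" and not inicio_encontrado:
--                 posicion_inicio = (i, u)
--                 inicio_encontrado = True
--             elif c == "." and not final_encontrado:
--                 posicion_final = (i, u)
--                 final_encontrado = True
--         if inicio_encontrado and final_encontrado:
--             break
--     return posicion_inicio, posicion_final
-- ===== Notes on version B (the rewrite author's own statement) =====
-- stated objective: alternative
-- what changed: B scans the grid backwards (rows last-to-first, cells right-to-left), records the first 'P' and first '.' it meets (= the last ones in forward order) and breaks out of the row loop as soon as both are found, instead of A's unconditional full forward scan with overwriting.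
import Mathlib
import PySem

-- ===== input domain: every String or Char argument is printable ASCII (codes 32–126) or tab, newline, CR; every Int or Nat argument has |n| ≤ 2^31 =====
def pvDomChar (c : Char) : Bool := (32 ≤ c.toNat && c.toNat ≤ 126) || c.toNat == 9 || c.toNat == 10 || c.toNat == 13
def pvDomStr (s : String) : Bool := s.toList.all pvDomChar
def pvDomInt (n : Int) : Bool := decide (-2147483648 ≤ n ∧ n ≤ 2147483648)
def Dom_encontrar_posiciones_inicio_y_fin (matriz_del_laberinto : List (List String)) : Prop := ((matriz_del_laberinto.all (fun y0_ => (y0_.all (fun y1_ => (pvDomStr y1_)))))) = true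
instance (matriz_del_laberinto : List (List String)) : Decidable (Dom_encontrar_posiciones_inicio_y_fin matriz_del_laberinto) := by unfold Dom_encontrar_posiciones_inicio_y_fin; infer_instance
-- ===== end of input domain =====

-- B scans the grid in reverse with an early break once both positions are found; A scans forward
-- overwriting. Equal wherever the Python A returns (Pre_: a 'P' cell and a '.' cell both exist;
-- outside Pre_ both Pythons raise UnboundLocalError and the ports return a (0,0) placeholder).

-- State: (last 'P' position found so far, last '.' position found so far)
abbrev PVSt := Option (Int × Int) × Option (Int × Int)

-- ===== PORT A =====
-- inner loop: for u in range(len(row)): overwrite on 'P' / '.'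
def pvACells (i : Int) (u : Int) (row : List String) (st : PVSt) : PVSt :=
  match row with
  | [] => st
  | c :: cs =>
    pvACells i (u + 1) cs
      (if c = "P" then (some (i, u), st.2)
       else if c = "." then (st.1, some (i, u))
       else st)

-- outer loop: for i in range(len(matriz)):
def pvARows (i : Int) (rows : List (List String)) (st : PVSt) : PVSt :=
  match rows with
  | [] => st
  | r :: rs => pvARows (i + 1) rs (pvACells i 0 r st)

def encontrar_posiciones_inicio_y_fin (matriz_del_laberinto : List (List String)) : (Int × Int) × (Int × Int) :=
  let st := pvARows 0 matriz_del_laberinto (none, none)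
  -- Python raises UnboundLocalError when a variable was never assigned; Pre_ excludes that, (0,0) is a placeholder
  (st.1.getD (0, 0), st.2.getD (0, 0))

-- ===== PORT B =====
-- enumerate a row with Int column indices starting at u
def pvEnumFrom (u : Int) (xs : List String) : List (Int × String) :=
  match xs with
  | [] => []
  | x :: rest => (u, x) :: pvEnumFrom (u + 1) rest

-- enumerate rows with Int row indices starting at i
def pvEnumRowsFrom (i : Int) (xs : List (List String)) : List (Int × List String) :=
  match xs with
  | [] => []
  | x :: rest => (i, x) :: pvEnumRowsFrom (i + 1) rest

-- inner loop: for u in range(len(fila)-1, -1, -1): keep the FIRST match (flags = isSome)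
def pvBCells (i : Int) (cells : List (Int × String)) (st : PVSt) : PVSt :=
  match cells with
  | [] => st
  | (u, c) :: rest =>
    pvBCells i rest
      (if c = "P" ∧ st.1 = none then (some (i, u), st.2)
       else if c = "." ∧ st.2 = none then (st.1, some (i, u))
       else st)

-- outer loop over rows in reverse, breaking once both flags are set
def pvBRows (rows : List (Int × List String)) (st : PVSt) : PVSt :=
  match rows with
  | [] => st
  | (i, r) :: rest =>
    let st' := pvBCells i (pvEnumFrom 0 r).reverse st
    if st'.1 ≠ none ∧ st'.2 ≠ none then st' else pvBRows rest st'

def encontrar_posiciones_inicio_y_fin_alt (matriz_del_laberinto : List (List String)) : (Int × Int) × (Int × Int) :=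
  let st := pvBRows (pvEnumRowsFrom 0 matriz_del_laberinto).reverse (none, none)
  (st.1.getD (0, 0), st.2.getD (0, 0))

-- ===== PRECONDITION & SPEC =====
-- Pre_ excludes exactly the grids with no "P" cell or no "." cell, on which the Python A
-- (and the Python B) raises UnboundLocalError.
def Pre_encontrar_posiciones_inicio_y_fin (matriz_del_laberinto : List (List String)) : Prop :=
  (∃ r ∈ matriz_del_laberinto, "P" ∈ r) ∧ (∃ r ∈ matriz_del_laberinto, "." ∈ r)
instance (matriz_del_laberinto : List (List String)) : Decidable (Pre_encontrar_posiciones_inicio_y_fin matriz_del_laberinto) := by unfold Pre_encontrar_posiciones_inicio_y_fin; infer_instance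

def pvWitness_encontrar_posiciones_inicio_y_fin : List (List String) := [["P", "#", "."]]

def Spec_encontrar_posiciones_inicio_y_fin (matriz_del_laberinto : List (List String)) (out : (Int × Int) × (Int × Int)) : Prop := out = encontrar_posiciones_inicio_y_fin_alt matriz_del_laberinto
instance (matriz_del_laberinto : List (List String)) (out : (Int × Int) × (Int × Int)) : Decidable (Spec_encontrar_posiciones_inicio_y_fin matriz_del_laberinto out) := by unfold Spec_encontrar_posiciones_inicio_y_fin; infer_instance

-- ===== CLAIM (what is proved, stated in full; the proofs are below) =====
def Claim_equal_encontrar_posiciones_inicio_y_fin : Prop := ∀ (matriz_del_laberinto : List (List String)), Dom_encontrar_posiciones_inicio_y_fin matriz_del_laberinto → Pre_encontrar_posiciones_inicio_y_fin matriz_del_laberinto → Spec_encontrar_posiciones_inicio_y_fin matriz_del_laberinto (encontrar_posiciones_inicio_y_fin matriz_del_laberinto)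

-- ===== LEMMAS AND PROOFS =====

-- priority-combine of two states (first argument wins componentwise)
def pvOor (a b : Option (Int × Int)) : Option (Int × Int) :=
  match a with | some x => some x | none => b

def pvComb (a b : PVSt) : PVSt := (pvOor a.1 b.1, pvOor a.2 b.2)

-- the flattened forward cell list: ((i,u), c) in A's visiting order
def pvRowCells (i u : Int) (row : List String) : List ((Int × Int) × String) :=
  match row with
  | [] => []
  | c :: cs => ((i, u), c) :: pvRowCells i (u + 1) cs

def pvCells (i : Int) (rows : List (List String)) : List ((Int × Int) × String) :=
  match rows with
  | [] => []
  | r :: rs => pvRowCells i 0 r ++ pvCells (i + 1) rs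

def pvFwd (st : PVSt) (p : (Int × Int) × String) : PVSt :=
  if p.2 = "P" then (some p.1, st.2)
  else if p.2 = "." then (st.1, some p.1)
  else st

def pvBwd (st : PVSt) (p : (Int × Int) × String) : PVSt :=
  if p.2 = "P" ∧ st.1 = none then (some p.1, st.2)
  else if p.2 = "." ∧ st.2 = none then (st.1, some p.1)
  else st

-- ---- A side: the nested loops are a fold of pvFwd over the flattened cell list ----
theorem pvACells_eq (i : Int) (row : List String) : ∀ (u : Int) (st : PVSt),
    pvACells i u row st = List.foldl pvFwd st (pvRowCells i u row) := by
  induction row with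
  | nil => intro u st; simp [pvACells, pvRowCells]
  | cons c cs ih => intro u st; simp [pvACells, pvRowCells, ih, pvFwd]

theorem pvARows_eq (rows : List (List String)) : ∀ (i : Int) (st : PVSt),
    pvARows i rows st = List.foldl pvFwd st (pvCells i rows) := by
  induction rows with
  | nil => intro i st; simp [pvARows, pvCells]
  | cons r rs ih => intro i st; simp [pvARows, pvCells, List.foldl_append, ih, pvACells_eq]

-- ---- B side: the break never changes the result (a full state is a fixed point) ----
theorem pvBwd_full (st : PVSt) (p : (Int × Int) × String) (h1 : st.1 ≠ none) (h2 : st.2 ≠ none) :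
    pvBwd st p = st := by
  simp [pvBwd, h1, h2]

theorem pvBCells_fold (i : Int) (cells : List (Int × String)) : ∀ (st : PVSt),
    pvBCells i cells st = List.foldl (fun st p => pvBwd st ((i, p.1), p.2)) st cells := by
  induction cells with
  | nil => intro st; simp [pvBCells]
  | cons p rest ih => intro st; cases p; simp [pvBCells, List.foldl, ih, pvBwd]

-- full (break-free) outer loop
def pvBFull (rows : List (Int × List String)) (st : PVSt) : PVSt :=
  match rows with
  | [] => st
  | (i, r) :: rest => pvBFull rest (pvBCells i (pvEnumFrom 0 r).reverse st)

theorem pvBFull_full (rows : List (Int × List String)) : ∀ (st : PVSt),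
    st.1 ≠ none → st.2 ≠ none → pvBFull rows st = st := by
  induction rows with
  | nil => intro st _ _; rfl
  | cons p rest ih =>
    intro st h1 h2
    cases p with
    | mk i r =>
      have hc : pvBCells i (pvEnumFrom 0 r).reverse st = st := by
        rw [pvBCells_fold]
        induction (pvEnumFrom 0 r).reverse with
        | nil => rfl
        | cons q qs ihq => simp [List.foldl, pvBwd_full st _ h1 h2, ihq]
      simp [pvBFull, hc, ih st h1 h2]

theorem pvBRows_eq_full (rows : List (Int × List String)) : ∀ (st : PVSt),
    pvBRows rows st = pvBFull rows st := by
  induction rows with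
  | nil => intro st; rfl
  | cons p rest ih =>
    intro st
    cases p with
    | mk i r =>
      simp only [pvBRows, pvBFull]
      split_ifs with h
      · exact (pvBFull_full rest _ h.1 h.2).symm
      · exact ih _

-- ---- B's cell order is the reverse of A's ----
theorem pvRowCells_map (i : Int) (row : List String) : ∀ (u : Int),
    pvRowCells i u row = (pvEnumFrom u row).map (fun p => ((i, p.1), p.2)) := by
  induction row with
  | nil => intro u; rfl
  | cons c cs ih => intro u; simp [pvRowCells, pvEnumFrom, ih]

theorem pvBCells_rev (i : Int) (row : List String) (st : PVSt) :
    pvBCells i (pvEnumFrom 0 row).reverse st = List.foldl pvBwd st (pvRowCells i 0 row).reverse := by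
  rw [pvBCells_fold, pvRowCells_map, ← List.map_reverse, List.foldl_map]

theorem pvBFull_append (l1 l2 : List (Int × List String)) : ∀ (st : PVSt),
    pvBFull (l1 ++ l2) st = pvBFull l2 (pvBFull l1 st) := by
  induction l1 with
  | nil => intro st; rfl
  | cons p rest ih => intro st; cases p; simp [pvBFull, ih]

theorem pvBFull_rev (rows : List (List String)) : ∀ (i : Int) (st : PVSt),
    pvBFull (pvEnumRowsFrom i rows).reverse st = List.foldl pvBwd st (pvCells i rows).reverse := by
  induction rows with
  | nil => intro i st; rfl
  | cons r rs ih =>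
    intro i st
    simp only [pvEnumRowsFrom, List.reverse_cons, pvCells, List.reverse_append,
      List.foldl_append, pvBFull_append, ih]
    simp [pvBFull, pvBCells_rev]

-- ---- core: keep-first over the reverse = overwrite forward ----
theorem pvFwd_shift (l : List ((Int × Int) × String)) : ∀ (st : PVSt),
    List.foldl pvFwd st l = pvComb (List.foldl pvFwd (none, none) l) st := by
  induction l with
  | nil =>
    intro st
    cases st with
    | mk a b => cases a <;> cases b <;> simp [pvComb, pvOor]
  | cons p rest ih =>
    intro st
    simp only [List.foldl]
    rw [ih (pvFwd st p), ih (pvFwd (none, none) p)]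
    cases st with
    | mk a b =>
      cases List.foldl pvFwd (none, none) rest with
      | mk x y =>
        simp only [pvFwd, pvComb]
        split_ifs <;> cases a <;> cases b <;> cases x <;> cases y <;> simp [pvOor]

theorem pvCore (l : List ((Int × Int) × String)) : ∀ (st : PVSt),
    List.foldl pvBwd st l.reverse = pvComb st (List.foldl pvFwd (none, none) l) := by
  induction l with
  | nil =>
    intro st
    cases st with
    | mk a b => cases a <;> cases b <;> simp [pvComb, pvOor]
  | cons p rest ih =>
    intro st
    simp only [List.reverse_cons, List.foldl_append, List.foldl, ih]
    rw [pvFwd_shift rest (pvFwd (none, none) p)]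
    cases st with
    | mk a b =>
      cases (List.foldl pvFwd (none, none) rest) with
      | mk x y =>
        simp only [pvFwd, pvComb, pvBwd]
        split_ifs with h1 h2 h3 h4 h5 <;>
          simp_all <;> cases a <;> cases b <;> cases x <;> cases y <;> simp_all [pvOor]

theorem pvMain (m : List (List String)) :
    encontrar_posiciones_inicio_y_fin m = encontrar_posiciones_inicio_y_fin_alt m := by
  simp only [encontrar_posiciones_inicio_y_fin, encontrar_posiciones_inicio_y_fin_alt,
    pvARows_eq, pvBRows_eq_full, pvBFull_rev, pvCore]
  cases (List.foldl pvFwd (none, none) (pvCells 0 m)) with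
  | mk x y => simp [pvComb, pvOor]

-- ===== VERDICT (by name: the statement is the Claim_ definition above) =====
theorem encontrar_posiciones_inicio_y_fin_spec : Claim_equal_encontrar_posiciones_inicio_y_fin := by
  intro m _ _
  exact pvMain m
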